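-- pv_equiv track=rewrite | github.com/edlav3/ITS-Python | Python/Esercizi/Esercizi Recupero 4 Giugno/esercizio1.py | convertitore
-- ===== SOURCE A (Python) =====
-- def convertitore(lista:list[tuple]) -> dict:
--     dizionario={}
--     for tupla in lista:
--         if tupla[0] not in dizionario:
--             dizionario[tupla[0]]=tupla[1]
--         else:
--             dizionario[tupla[0]]+=tupla[1]
--     return dizionario
-- ===== SOURCE B (Python) =====
-- def _somma(vals):
--     # fold with + starting from the first element (keeps the original's
--     # assign-then-+= semantics, no 0 seed)
--     acc = vals[0]
--     for v in vals[1:]: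
--         acc = acc + v
--     return acc
--
--
-- def convertitore(lista: list[tuple]) -> dict:
--     # pass 1: group every value under its key, in encounter order
--     groups = {}
--     for chiave, valore in lista:
--         groups.setdefault(chiave, []).append(valore)
--     # pass 2: collapse each group by folding it with +
--     return {chiave: _somma(vals) for chiave, vals in groups.items()}
-- ===== Notes on version B (the rewrite author's own statement) =====
-- stated objective: alternative
-- what changed: Replaces the single in-place accumulate-as-you-go dict pass with build-an-index-then-transform: a first pass groups all values per key into lists, a second pass folds each group with + (seeded from the first element) into the result dict.
import Mathlib
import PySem

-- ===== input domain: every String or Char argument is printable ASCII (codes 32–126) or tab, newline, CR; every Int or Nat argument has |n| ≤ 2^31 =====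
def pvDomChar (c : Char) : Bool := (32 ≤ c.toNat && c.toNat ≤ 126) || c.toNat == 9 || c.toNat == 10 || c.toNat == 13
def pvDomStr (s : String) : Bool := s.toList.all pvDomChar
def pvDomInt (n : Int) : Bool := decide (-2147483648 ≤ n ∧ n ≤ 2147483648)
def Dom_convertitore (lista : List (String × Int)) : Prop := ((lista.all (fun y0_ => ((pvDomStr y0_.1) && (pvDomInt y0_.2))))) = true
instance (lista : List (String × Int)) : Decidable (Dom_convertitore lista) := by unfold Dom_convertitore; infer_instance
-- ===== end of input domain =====

-- B replaces A's single accumulate-in-place pass by group-into-lists then fold-each-group-with-+ (alternative decomposition, same cost).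

-- ===== PORT A =====
-- for tupla in lista: if tupla[0] not in dizionario: dizionario[tupla[0]] = tupla[1] else: dizionario[tupla[0]] += tupla[1]
def convertitore (lista : List (String × Int)) : List (String × Int) :=
  (lista.foldl
    (fun dizionario tupla =>
      if dizionario.contains tupla.1 = false then dizionario.insert tupla.1 tupla.2
      else dizionario.modify tupla.1 0 (fun x => x + tupla.2))
    PySem.Dict.empty).items

-- ===== PORT B =====
-- acc = vals[0]; for v in vals[1:]: acc = acc + v  (only called on the nonempty group lists; 0 branch unreachable)
def somma (vals : List Int) : Int :=
  match vals with
  | [] => 0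
  | acc :: rest => rest.foldl (fun a v => a + v) acc

def convertitore_alt (lista : List (String × Int)) : List (String × Int) :=
  let groups : PySem.Dict String (List Int) :=
    lista.foldl (fun g t => g.modify t.1 [] (fun vs => vs ++ [t.2])) PySem.Dict.empty
  -- dict comprehension over groups.items: keys are already distinct, so it is the mapped items list
  groups.items.map (fun p => (p.1, somma p.2))

-- ===== PRECONDITION & SPEC =====
def Spec_convertitore (lista : List (String × Int)) (out : List (String × Int)) : Prop := out = convertitore_alt lista
instance (lista : List (String × Int)) (out : List (String × Int)) : Decidable (Spec_convertitore lista out) := by unfold Spec_convertitore; infer_instance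

-- ===== CLAIM (what is proved, stated in full; the proofs are below) =====
def Claim_equal_convertitore : Prop := ∀ (lista : List (String × Int)), Dom_convertitore lista → Spec_convertitore lista (convertitore lista)

-- ===== LEMMAS AND PROOFS =====

theorem somma_append (vs : List Int) (v : Int) (h : vs ≠ []) :
    somma (vs ++ [v]) = somma vs + v := by
  cases vs with
  | nil => exact absurd rfl h
  | cons a t => simp [somma, List.foldl_append]

theorem convertitore_loop (lista : List (String × Int))
    (dA : PySem.Dict String Int) (gB : PySem.Dict String (List Int))
    (h1 : dA.items = gB.items.map (fun p => (p.1, somma p.2)))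
    (h2 : gB.keys.Nodup)
    (h3 : ∀ p ∈ gB.items, p.2 ≠ []) :
    (lista.foldl
      (fun d t => if d.contains t.1 = false then d.insert t.1 t.2
                  else d.modify t.1 0 (fun x => x + t.2)) dA).items
    = ((lista.foldl (fun g t => g.modify t.1 [] (fun vs => vs ++ [t.2])) gB).items).map
        (fun p => (p.1, somma p.2)) := by
  induction lista generalizing dA gB with
  | nil => simpa using h1
  | cons t rest ih =>
    obtain ⟨k, v⟩ := t
    have hkeys : dA.keys = gB.keys := by
      simp only [PySem.Dict.keys, h1, List.map_map]
      rfl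
    have hnA : dA.keys.Nodup := hkeys ▸ h2
    have hcont : dA.contains k = gB.contains k := by
      rw [PySem.Dict.contains_eq_decide_mem_keys, PySem.Dict.contains_eq_decide_mem_keys, hkeys]
    simp only [List.foldl_cons]
    by_cases hc : gB.contains k = true
    · -- key already present: both sides rewrite the existing entry in place
      have hcA : dA.contains k = true := by rw [hcont]; exact hc
      -- the existing group is nonempty and its fold equals A's stored value
      have hmemk : k ∈ gB.keys := (PySem.Dict.contains_iff_mem_keys gB k).mp hc
      obtain ⟨p, hp, hpk⟩ := List.mem_map.mp (by simpa only [PySem.Dict.keys] using hmemk)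
      obtain ⟨k', vs⟩ := p
      subst hpk
      have hgetB : gB.getD k' [] = vs := PySem.Dict.getD_of_mem_items gB hp h2 []
      have hmemA : (k', somma vs) ∈ dA.items := by
        rw [h1]; exact List.mem_map.mpr ⟨(k', vs), hp, rfl⟩
      have hgetA : dA.getD k' 0 = somma vs := PySem.Dict.getD_of_mem_items dA hmemA hnA 0
      have hvs : vs ≠ [] := h3 (k', vs) hp
      rw [if_neg (by simp [hcA]), PySem.Dict.modify, PySem.Dict.modify]
      apply ih
      · rw [PySem.Dict.items_insert_of_contains dA _ hcA,
            PySem.Dict.items_insert_of_contains gB _ hc, h1,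
            List.map_map, List.map_map]
        apply List.map_congr_left
        intro q hq
        by_cases hqk : q.1 = k'
        · simp [hqk, hgetA, hgetB, somma_append vs v hvs]
        · simp [hqk]
      · simpa [PySem.Dict.keys_insert_of_contains gB _ hc] using h2
      · intro q hq
        rcases (PySem.Dict.mem_items_insert _ _ _ _).mp hq with hq1 | ⟨hq2, _⟩
        · subst hq1; simp
        · exact h3 q hq2
    · -- fresh key: both sides append a new entry
      have hcB : gB.contains k = false := by simpa using hc
      have hcA : dA.contains k = false := by rw [hcont]; exact hcB
      have hgB : gB.getD k [] = [] := PySem.Dict.getD_of_not_contains gB [] hcB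
      have hmB : (gB.modify k [] (fun vs => vs ++ [v])) = gB.insert k [v] := by
        rw [PySem.Dict.modify, hgB]; rfl
      rw [if_pos hcA, hmB]
      apply ih
      · rw [PySem.Dict.items_insert_of_not_contains dA _ hcA,
            PySem.Dict.items_insert_of_not_contains gB _ hcB, h1]
        simp [somma]
      · rw [PySem.Dict.keys_insert_of_not_contains gB _ hcB]
        simpa using
          List.Nodup.append h2 (List.nodup_singleton k) (by
            intro x hx hxk
            simp at hxk
            rw [hxk] at hx
            exact absurd ((PySem.Dict.contains_iff_mem_keys gB k).mpr hx) (by simp [hcB]))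
      · intro q hq
        rcases (PySem.Dict.mem_items_insert _ _ _ _).mp hq with hq1 | ⟨hq2, _⟩
        · subst hq1; simp
        · exact h3 q hq2

-- ===== VERDICT (by name: the statement is the Claim_ definition above) =====
theorem convertitore_spec : Claim_equal_convertitore := by
  intro lista _
  unfold Spec_convertitore convertitore convertitore_alt
  exact convertitore_loop lista PySem.Dict.empty PySem.Dict.empty (by simp [PySem.Dict.empty]) (by simp [PySem.Dict.empty, PySem.Dict.keys]) (by simp [PySem.Dict.empty])
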